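-- pv_equiv track=rewrite | github.com/jurayev/data-structures-algorithms-solutions | 2150-find-all-lonely-numbers-in-the-array/2150-find-all-lonely-numbers-in-the-array.py | findLonely
-- ===== SOURCE A (Python) =====
-- from typing import List
--
-- def findLonely(nums: List[int]) -> List[int]:
--     """
--     [10,6,5,8]
--
--     [0, 1, 2, 3, 4, 5, 6, 7, 8, 9, 10]
--     [-1, -1, -1,-1, 5, 6,-1, 8, -1, 10]
--
--     """
--     buckets = [0] * 1000002
--
--     for num in nums:
--         buckets[num] += 1
--
--     lonely_nums = []
--     for num in nums:
--         if buckets[num] == 1 and not buckets[num-1] and not buckets[num+1]: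
--             lonely_nums.append(num)
--
--     return lonely_nums
-- ===== SOURCE B (Python) =====
-- def findLonely(nums):
--     # Sort a copy; in sorted order a value is lonely iff it appears once with no
--     # equal/adjacent sorted neighbor.  Emit in the original order of nums.
--     s = sorted(nums)
--     lonely = set()
--     last = len(s) - 1
--     for i, x in enumerate(s):
--         if (i == 0 or s[i - 1] < x - 1) and (i == last or s[i + 1] > x + 1):
--             lonely.add(x)
--     return [x for x in nums if x in lonely]
-- ===== Notes on version B (the rewrite author's own statement) =====
-- stated objective: alternative
-- what changed: Replaces A's fixed 1000002-slot bucket table (allocated on every call and value-indexed, wrapping on negatives) by sort-then-scan: one pass over the sorted copy marks values whose sorted neighbors differ by at least 2, then nums is filtered in original order.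
-- intended difference: On lists (inside Pre_) that contain a lonely value x (appearing once, with neither x-1 nor x+1 present) together with another element between 1000001 and 1000003 away, that element's bucket index aliases into x's window modulo 1000002 (Python's negative indexing wraps A's fixed table), so A wrongly omits x (e.g. [] on [5, -999997]) while B returns it ([5, -999997]); B's is the intended result. — e.g. on findLonely([5, -999997]): A returns [], B returns [5, -999997]
-- outside the precondition, e.g. on findLonely([1000001, -1]): A returns [], B returns [1000001, -1]; on findLonely([1000001, 1000001]): A returns [], B returns []
import Mathlib
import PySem

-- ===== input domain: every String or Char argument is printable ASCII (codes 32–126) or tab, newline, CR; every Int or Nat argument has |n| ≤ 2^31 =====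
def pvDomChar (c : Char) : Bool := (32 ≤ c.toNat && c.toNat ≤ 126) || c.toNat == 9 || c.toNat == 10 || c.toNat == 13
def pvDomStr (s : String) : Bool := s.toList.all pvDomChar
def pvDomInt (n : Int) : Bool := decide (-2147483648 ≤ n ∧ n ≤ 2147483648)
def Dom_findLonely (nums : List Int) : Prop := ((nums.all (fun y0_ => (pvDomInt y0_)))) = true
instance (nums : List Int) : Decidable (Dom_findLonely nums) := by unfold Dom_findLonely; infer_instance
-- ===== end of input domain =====

-- B replaces A's always-allocated 1000002-slot bucket table by sort-then-scan (objective: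
-- alternative algorithm of similar cost); on inputs with two elements ~1000002 apart B
-- returns the true lonely values where A's negative bucket indices wrap (see D_ below).

-- ===== PORT A =====
-- buckets[num] += 1  (Python indexing: negative indices wrap; out-of-range raises, excluded by Pre_)
def pvStepA (b : List Int) (num : Int) : List Int :=
  PySem.List.pySetD b num (PySem.List.pyGetD b num 0 + 1)

def findLonely (nums : List Int) : List Int :=
  let buckets := List.replicate 1000002 (0 : Int)
  let buckets := nums.foldl pvStepA buckets
  -- 'not buckets[x]' is int truthiness; bucket values are counts (≥ 0), so it is '== 0'
  nums.foldl (fun lonely_nums num =>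
    if PySem.List.pyGetD buckets num 0 == 1
        && PySem.List.pyGetD buckets (num - 1) 0 == 0
        && PySem.List.pyGetD buckets (num + 1) 0 == 0
    then lonely_nums ++ [num] else lonely_nums) []

-- ===== PORT B =====
-- the if-condition of Source B's scan over enumerate(s) (i = index, x = s[i])
def pvCond (s : List Int) (i : Int) (x : Int) : Bool :=
  (i == 0 || PySem.List.pyGetD s (i - 1) 0 < x - 1)
    && (i == (s.length : Int) - 1 || PySem.List.pyGetD s (i + 1) 0 > x + 1)

def findLonely_alt (nums : List Int) : List Int :=
  let s := PySem.List.sorted nums (fun x => x)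
  let lonely : PySem.Set Int :=
    (PySem.List.enumerate s).foldl (fun lonely p =>
      if pvCond s p.1 p.2 then PySem.Set.add lonely p.2 else lonely) PySem.Set.empty
  nums.filter (fun x => PySem.Set.contains lonely x)

-- ===== PRECONDITION & SPEC =====
-- Pre_ excludes lists with an element outside [-1000001, 1000000]: there A's fixed
-- 1000002-slot bucket table raises IndexError on almost all inputs, and where a
-- short-circuit lets it return anyway the value reflects accidental bucket sharing.
def Pre_findLonely (nums : List Int) : Prop :=
  ∀ n ∈ nums, -1000001 ≤ n ∧ n ≤ 1000000
instance (nums : List Int) : Decidable (Pre_findLonely nums) := by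
  unfold Pre_findLonely; infer_instance

def pvWitness_findLonely : List Int := [5, 7]

-- On lists (inside Pre_) that contain a lonely value x (appearing once, with neither
-- x-1 nor x+1 present) together with another element between 1000001 and 1000003 away,
-- that element's bucket index aliases into x's window modulo 1000002 (Python's negative
-- indexing wraps A's fixed table), so A wrongly omits x (e.g. [] on [5, -999997]) while
-- B returns it ([5, -999997]); B's is the intended result.
def D_findLonely (nums : List Int) : Prop :=
  ∃ x ∈ nums, nums.count x = 1 ∧ x - 1 ∉ nums ∧ x + 1 ∉ nums ∧
    ∃ n ∈ nums, |x - n - 1000002| ≤ 1 ∨ |n - x - 1000002| ≤ 1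
instance (nums : List Int) : Decidable (D_findLonely nums) := by
  unfold D_findLonely; infer_instance

def Spec_findLonely (nums : List Int) (out : List Int) : Prop :=
  ¬ D_findLonely nums → out = findLonely_alt nums
instance (nums : List Int) (out : List Int) : Decidable (Spec_findLonely nums out) := by
  unfold Spec_findLonely; infer_instance

def pvDiffWitness_findLonely : List Int := [5, -999997]
def pvDiffWitnessOut_findLonely : (List Int) × (List Int) := ([], [5, -999997])

-- ===== CLAIM (what is proved, stated in full; the proofs are below) =====
def Claim_unchanged_findLonely : Prop := ∀ (nums : List Int), Dom_findLonely nums → Pre_findLonely nums → Spec_findLonely nums (findLonely nums)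
def Claim_changed_findLonely : Prop := Dom_findLonely (pvDiffWitness_findLonely) ∧ Pre_findLonely (pvDiffWitness_findLonely) ∧ D_findLonely (pvDiffWitness_findLonely) ∧ findLonely (pvDiffWitness_findLonely) = pvDiffWitnessOut_findLonely.1 ∧ findLonely_alt (pvDiffWitness_findLonely) = pvDiffWitnessOut_findLonely.2 ∧ pvDiffWitnessOut_findLonely.1 ≠ pvDiffWitnessOut_findLonely.2
def Claim_exact_findLonely : Prop := ∀ (nums : List Int), Dom_findLonely nums → Pre_findLonely nums → D_findLonely nums → findLonely nums ≠ findLonely_alt nums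

-- ===== LEMMAS AND PROOFS =====

-- true lonely status of x in nums (what B computes)
def pvLonelyB (nums : List Int) (x : Int) : Bool :=
  nums.count x == 1 && nums.count (x - 1) == 0 && nums.count (x + 1) == 0

-- lonely status of x as A's mod-1000002 bucket table sees it
def pvCntR (nums : List Int) (j : Int) : Nat :=
  nums.countP (fun n => n % 1000002 == j % 1000002)
def pvLonelyA (nums : List Int) (x : Int) : Bool :=
  pvCntR nums x == 1 && pvCntR nums (x - 1) == 0 && pvCntR nums (x + 1) == 0

theorem pvCountP_two (l : List Int) (a b : Int) (hab : a ≠ b) :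
    l.countP (fun n => n == a || n == b)
      = l.countP (fun n => n == a) + l.countP (fun n => n == b) := by
  induction l with
  | nil => simp
  | cons hd t ih =>
      simp only [List.countP_cons, ih]
      by_cases h1 : hd = a
      · subst h1
        have hb : (hd == b) = false := by rw [beq_eq_false_iff_ne]; exact hab
        simp [hb]
        omega
      · by_cases h2 : hd = b
        · subst h2
          have ha' : (hd == a) = false := by rw [beq_eq_false_iff_ne]; exact h1
          simp [ha']
          omega
        · have ha' : (hd == a) = false := by rw [beq_eq_false_iff_ne]; exact h1
          have hb' : (hd == b) = false := by rw [beq_eq_false_iff_ne]; exact h2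
          simp [ha', hb']

-- every true occurrence of j lands in j's bucket residue class
theorem pvCount_le_cntR (nums : List Int) (j : Int) :
    nums.count j ≤ pvCntR nums j := by
  unfold pvCntR
  rw [List.count_eq_countP]
  apply List.countP_mono_left
  intro n _ h
  have hn : n = j := by simpa using h
  subst hn; simp

-- residue counts dominate true counts, so A only ever omits truly lonely values
theorem pvLonelyA_le (nums : List Int) (x : Int) (hx : x ∈ nums)
    (hA : pvLonelyA nums x = true) : pvLonelyB nums x = true := by
  simp only [pvLonelyA, Bool.and_eq_true, beq_iff_eq] at hA
  obtain ⟨⟨h1, h2⟩, h3⟩ := hA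
  have c1 := pvCount_le_cntR nums x
  have c2 := pvCount_le_cntR nums (x-1)
  have c3 := pvCount_le_cntR nums (x+1)
  have hp : 0 < nums.count x := List.count_pos_iff.mpr hx
  simp only [pvLonelyB, Bool.and_eq_true, beq_iff_eq]
  omega

-- without a partner 1000001..1000003 away, x's bucket window reads true counts
theorem pvCntR_eq_count (nums : List Int)
    (hpre : ∀ n ∈ nums, -1000001 ≤ n ∧ n ≤ 1000000)
    (x : Int) (hxb : -1000001 ≤ x ∧ x ≤ 1000000)
    (hnp : ∀ n ∈ nums, ¬(|x - n - 1000002| ≤ 1 ∨ |n - x - 1000002| ≤ 1))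
    (d : Int) (hd : -1 ≤ d ∧ d ≤ 1) :
    pvCntR nums (x + d) = nums.count (x + d) := by
  unfold pvCntR
  rw [List.count_eq_countP]
  apply List.countP_congr
  intro n hn
  have hb := hpre n hn
  have hp := hnp n hn
  simp only [abs_le, not_or] at hp
  simp only [beq_iff_eq]
  omega

-- a partner 1000001..1000003 away makes A's window test fail at x
theorem pvLonelyA_false_of_partner (nums : List Int) (x n0 : Int)
    (hx : x ∈ nums) (hn : n0 ∈ nums)
    (hd : |x - n0 - 1000002| ≤ 1 ∨ |n0 - x - 1000002| ≤ 1) :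
    pvLonelyA nums x = false := by
  simp only [abs_le] at hd
  obtain ⟨e, he1, he2⟩ : ∃ e : Int, (-1 ≤ e ∧ e ≤ 1)
      ∧ (n0 = x + e + 1000002 ∨ n0 = x + e - 1000002) := by
    rcases hd with ⟨h1, h2⟩ | ⟨h1, h2⟩
    · exact ⟨n0 - x + 1000002, by omega, by omega⟩
    · exact ⟨n0 - x - 1000002, by omega, by omega⟩
  have hcase : e = -1 ∨ e = 0 ∨ e = 1 := by omega
  rcases hcase with rfl | rfl | rfl
  · have hpos : 0 < pvCntR nums (x - 1) := by
      apply List.countP_pos_iff.mpr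
      refine ⟨n0, hn, ?_⟩
      simp only [beq_iff_eq]
      omega
    have hne : (pvCntR nums (x - 1) == 0) = false := by
      rw [beq_eq_false_iff_ne]; omega
    simp [pvLonelyA, hne]
  · have h2 : 2 ≤ pvCntR nums x := by
      have hmono : nums.countP (fun n => n == x || n == n0) ≤ pvCntR nums x := by
        apply List.countP_mono_left
        intro n _ h
        rcases Bool.or_eq_true .. |>.mp h with h | h
        · have : n = x := by simpa using h
          subst this; simp
        · have : n = n0 := by simpa using h
          subst this
          simp only [beq_iff_eq]
          omega
      rw [pvCountP_two nums x n0 (by omega)] at hmono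
      have ha : 0 < nums.countP (fun n => n == x) :=
        List.countP_pos_iff.mpr ⟨x, hx, by simp⟩
      have hb : 0 < nums.countP (fun n => n == n0) :=
        List.countP_pos_iff.mpr ⟨n0, hn, by simp⟩
      omega
    have hne : (pvCntR nums x == 1) = false := by
      rw [beq_eq_false_iff_ne]; omega
    simp [pvLonelyA, hne]
  · have hpos : 0 < pvCntR nums (x + 1) := by
      apply List.countP_pos_iff.mpr
      refine ⟨n0, hn, ?_⟩
      simp only [beq_iff_eq]
      omega
    have hne : (pvCntR nums (x + 1) == 0) = false := by
      rw [beq_eq_false_iff_ne]; omega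
    simp [pvLonelyA, hne]

-- ---- A-side: the bucket table holds mod-1000002 residue counts ----

theorem pvStepA_length (b : List Int) (num : Int) :
    (pvStepA b num).length = b.length := by
  simp [pvStepA, PySem.List.pySetD, PySem.List.pySet?]
  cases PySem.List.pyIdx? b.length num <;> simp

theorem pvGetD_emod (b : List Int) (hb : b.length = 1000002) (i : Int)
    (h1 : -1000002 ≤ i) (h2 : i ≤ 1000001) :
    PySem.List.pyGetD b i 0 = b.getD (i % 1000002).toNat 0 := by
  have hidx : PySem.List.pyIdx? b.length i = some (i % 1000002).toNat := by
    simp only [PySem.List.pyIdx?, hb]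
    split_ifs with hA hB hC
    · congr 1; omega
    · omega
    · congr 1; omega
    · omega
  simp [PySem.List.pyGetD, PySem.List.pyGet?, hidx, List.getD_eq_getElem?_getD]

theorem pvStepA_eq (b : List Int) (hb : b.length = 1000002) (num : Int)
    (h1 : -1000002 ≤ num) (h2 : num ≤ 1000001) :
    pvStepA b num
      = b.set (num % 1000002).toNat (b.getD (num % 1000002).toNat 0 + 1) := by
  have hidx : PySem.List.pyIdx? b.length num = some (num % 1000002).toNat := by
    simp only [PySem.List.pyIdx?, hb]
    split_ifs with hA hB hC
    · congr 1; omega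
    · omega
    · congr 1; omega
    · omega
  unfold pvStepA
  rw [pvGetD_emod b hb num h1 h2]
  simp [PySem.List.pySetD, PySem.List.pySet?, hidx]

theorem pvBuckets_length (nums : List Int) (b : List Int) :
    (nums.foldl pvStepA b).length = b.length := by
  induction nums generalizing b with
  | nil => rfl
  | cons n t ih => simp [List.foldl, ih, pvStepA_length]

theorem pvBuckets_spec (nums : List Int) (hn : ∀ n ∈ nums, -1000002 ≤ n ∧ n ≤ 1000001)
    (b : List Int) (hb : b.length = 1000002) (j : Nat) (hj : j < 1000002) :
    (nums.foldl pvStepA b).getD j 0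
      = b.getD j 0 + ((nums.countP (fun n => n % 1000002 == (j : Int))) : Int) := by
  induction nums generalizing b with
  | nil => simp
  | cons n t ih =>
      have hn0 := hn n (List.mem_cons_self ..)
      have hrest : ∀ m ∈ t, -1000002 ≤ m ∧ m ≤ 1000001 := fun m hm => hn m (List.mem_cons_of_mem _ hm)
      rw [List.foldl_cons, pvStepA_eq b hb n hn0.1 hn0.2]
      set k := (n % 1000002).toNat with hk
      have hkk : k < 1000002 := by omega
      have hlen : (b.set k (b.getD k 0 + 1)).length = 1000002 := by simp [hb]
      rw [ih hrest _ hlen]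
      have hget : (b.set k (b.getD k 0 + 1)).getD j 0
          = b.getD j 0 + (if k = j then 1 else 0) := by
        by_cases h : k = j
        · subst h
          rw [List.getD_eq_getElem?_getD, List.getElem?_set_self (by omega)]
          simp
        · rw [List.getD_eq_getElem?_getD, List.getElem?_set_ne h,
            ← List.getD_eq_getElem?_getD]
          simp [h]
      rw [hget, List.countP_cons]
      have : ((n % 1000002 == (j:Int)) = true) ↔ k = j := by
        constructor
        · intro h; have := eq_of_beq h; omega
        · intro h; refine beq_iff_eq.mpr ?_; omega
      by_cases h : k = j
      · simp [this.mpr h, h]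
        ring
      · have : (n % 1000002 == (j:Int)) = false := by
          rcases Bool.eq_false_or_eq_true (n % 1000002 == (j:Int)) with ht | hf
          · exact absurd (this.mp ht) h
          · exact hf
        simp [this, h]

theorem pvA_eq_filter (nums : List Int) (hpre : Pre_findLonely nums) :
    findLonely nums = nums.filter (pvLonelyA nums) := by
  have hnn : ∀ n ∈ nums, -1000002 ≤ n ∧ n ≤ 1000001 := by
    intro n hn; have := hpre n hn; omega
  unfold findLonely
  have hbl : (nums.foldl pvStepA (List.replicate 1000002 (0:Int))).length = 1000002 := by
    rw [pvBuckets_length, List.length_replicate]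
  have read : ∀ i : Int, -1000002 ≤ i → i ≤ 1000001 →
      PySem.List.pyGetD (nums.foldl pvStepA (List.replicate 1000002 (0:Int))) i 0
        = (pvCntR nums i : Int) := by
    intro i h1 h2
    rw [pvGetD_emod _ hbl i h1 h2,
      pvBuckets_spec nums hnn _ (by rw [List.length_replicate]) _ (by omega)]
    have hc : (((i % 1000002).toNat : Int)) = i % 1000002 :=
      Int.toNat_of_nonneg (Int.emod_nonneg _ (by norm_num))
    simp only [hc, pvCntR]
    rw [List.getD_replicate _ (by omega), zero_add]
  rw [PySem.List.foldl_append_if_eq_filter, List.nil_append]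
  refine List.filter_congr ?_
  intro x hx
  have hb := hpre x hx
  rw [read x (by omega) (by omega), read (x-1) (by omega) (by omega),
    read (x+1) (by omega) (by omega)]
  simp only [pvLonelyA]
  have cast_beq : ∀ (c m : Nat), (((c:Int)) == ((m:Int))) = (c == m) := by
    intro c m
    rcases Bool.eq_false_or_eq_true (c == m) with h | h
    · rw [h]; simp at h ⊢; omega
    · rw [h]; simp at h ⊢; omega
  have h1 := cast_beq (pvCntR nums x) 1
  have h0 := cast_beq (pvCntR nums (x-1)) 0
  have h0' := cast_beq (pvCntR nums (x+1)) 0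
  push_cast at h1 h0 h0'
  rw [h1, h0, h0']

-- ---- B-side: the scan of the sorted copy collects exactly the truly lonely values ----

-- Prop form of pvCond at Nat index i
def pvCondP (s : List Int) (i : Nat) : Prop :=
  (i = 0 ∨ s.getD (i - 1) 0 < s.getD i 0 - 1)
    ∧ (i + 1 = s.length ∨ s.getD (i + 1) 0 > s.getD i 0 + 1)

theorem pvGet_nat (s : List Int) (j : Nat) (h : j < s.length) :
    PySem.List.pyGetD s (j : Int) 0 = s.getD j 0 := by
  rw [PySem.List.pyGetD_eq_getElem s 0 (by positivity) (by exact_mod_cast h)]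
  rw [List.getD_eq_getElem _ _ (by simpa using h)]
  simp

theorem pvCond_iff (s : List Int) (i : Nat) (h : i < s.length) :
    pvCond s (i : Int) (s.getD i 0) = true ↔ pvCondP s i := by
  unfold pvCond pvCondP
  simp only [Bool.and_eq_true, Bool.or_eq_true, beq_iff_eq, decide_eq_true_eq]
  apply and_congr
  · by_cases h0 : i = 0
    · subst h0; simp
    · have hL : ¬ ((i:Int) = 0) := by exact_mod_cast h0
      have hcast : (i:Int) - 1 = ((i - 1 : Nat) : Int) := by push_cast [Nat.cast_sub (by omega : 1 ≤ i)]; ring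
      rw [hcast, pvGet_nat s (i-1) (by omega)]
      simp [h0]
  · by_cases h1 : i + 1 = s.length
    · have : (i:Int) = (s.length : Int) - 1 := by omega
      simp [this, h1]
    · have hR : ¬ ((i:Int) = (s.length:Int) - 1) := by
        intro hc; exact h1 (by omega)
      have hcast : (i:Int) + 1 = ((i + 1 : Nat) : Int) := by push_cast; ring
      rw [hcast, pvGet_nat s (i+1) (by omega)]
      simp [h1, hR]

theorem pvMem_foldl_add_ite (cond : Int → Int → Bool) (l : List (Int × Int))
    (L : PySem.Set Int) (y : Int) :
    (y ∈ l.foldl (fun L p => if cond p.1 p.2 then PySem.Set.add L p.2 else L) L)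
      ↔ y ∈ L ∨ ∃ p ∈ l, cond p.1 p.2 = true ∧ p.2 = y := by
  induction l generalizing L with
  | nil => simp
  | cons q t ih =>
      simp only [List.foldl_cons, List.mem_cons]
      by_cases hq : cond q.1 q.2 = true
      · rw [if_pos hq, ih]
        simp [PySem.Set.mem_add, hq]
        tauto
      · rw [if_neg hq, ih]
        constructor
        · rintro (h | ⟨p, hp, hc, he⟩)
          · exact Or.inl h
          · exact Or.inr ⟨p, Or.inr hp, hc, he⟩
        · rintro (h | ⟨p, (rfl | hp), hc, he⟩)
          · exact Or.inl h
          · exact absurd hc hq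
          · exact Or.inr ⟨p, hp, hc, he⟩

theorem pvMem_enumerate (s : List Int) (k : Int) (p : Int × Int) :
    p ∈ PySem.List.enumerate s k
      ↔ ∃ i : Nat, i < s.length ∧ p = (k + (i : Int), s.getD i 0) := by
  induction s generalizing k with
  | nil => simp [PySem.List.enumerate]
  | cons x t ih =>
      rw [PySem.List.enumerate_cons, List.mem_cons, ih]
      constructor
      · rintro (rfl | ⟨i, hi, rfl⟩)
        · exact ⟨0, by simp, by simp [List.getD]⟩
        · refine ⟨i + 1, by simp only [List.length_cons]; omega, ?_⟩
          simp only [List.getD_cons_succ]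
          congr 1
          push_cast
          ring
      · rintro ⟨i, hi, rfl⟩
        cases i with
        | zero => exact Or.inl (by simp [List.getD])
        | succ m =>
            refine Or.inr ⟨m, by simp only [List.length_cons] at hi; omega, ?_⟩
            simp only [List.getD_cons_succ]
            congr 1
            push_cast
            ring

theorem pvLonely_iff (nums : List Int) (x : Int) :
    (∃ i : Nat, i < (PySem.List.sorted nums (fun x => x)).length
        ∧ (PySem.List.sorted nums (fun x => x)).getD i 0 = x
        ∧ pvCondP (PySem.List.sorted nums (fun x => x)) i)
      ↔ x ∈ nums ∧ pvLonelyB nums x = true := by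
  set s := PySem.List.sorted nums (fun x => x) with hs
  have hperm : s.Perm nums := PySem.List.sorted_perm nums (fun x => x) false
  have hcnt : ∀ v : Int, s.count v = nums.count v := fun v => hperm.count_eq v
  have hmemi : ∀ v : Int, v ∈ s ↔ v ∈ nums := fun v => hperm.mem_iff
  have mono : ∀ (p q : Nat) (hpq : p ≤ q) (hq : q < s.length),
      s[p]'(by omega) ≤ s[q]'hq := by
    intro p q hpq hq
    exact PySem.List.sorted_id_getElem_mono nums hpq hq
  have hdec : ∀ (v : Int) (i : Nat) (h : i < s.length),
      s.count v = (s.take i).count v + (if s[i]'h = v then 1 else 0)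
        + (s.drop (i+1)).count v := by
    intro v i h
    conv_lhs =>
      rw [← List.take_append_drop i s, ← List.getElem_cons_drop h]
    rw [List.count_append, List.count_cons]
    have : (s[i]'h == v) = decide (s[i]'h = v) := by rfl
    simp only [this, decide_eq_true_eq]
    ring
  constructor
  · rintro ⟨i, hi, hx, hCl, hCr⟩
    have hgi : s[i]'hi = x := by rw [← List.getD_eq_getElem s 0 hi]; exact hx
    have hT : ∀ y ∈ s.take i, y ≤ x - 2 := by
      intro y hy
      rcases List.mem_take_iff_getElem.mp hy with ⟨p, hp, rfl⟩
      have hpi : p < i := by omega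
      rcases hCl with h0 | hlt
      · omega
      · rw [List.getD_eq_getElem _ _ (by omega : i - 1 < s.length),
          List.getD_eq_getElem _ _ hi] at hlt
        have hm := mono p (i-1) (by omega) (by omega)
        omega
    have hD : ∀ y ∈ s.drop (i+1), x + 2 ≤ y := by
      intro y hy
      rcases List.mem_iff_getElem.mp hy with ⟨j, hj, rfl⟩
      have hlen : i + 1 + j < s.length := by
        rw [List.length_drop] at hj; omega
      rw [List.getElem_drop]
      rcases hCr with h0 | hgt
      · rw [List.length_drop] at hj; omega
      · rw [List.getD_eq_getElem _ _ (by omega : i + 1 < s.length),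
          List.getD_eq_getElem _ _ hi] at hgt
        have hm := mono (i+1) (i+1+j) (by omega) hlen
        omega
    have hc1 : s.count x = 1 := by
      rw [hdec x i hi, if_pos hgi,
        List.count_eq_zero.mpr (fun hm => by have := hT x hm; omega),
        List.count_eq_zero.mpr (fun hm => by have := hD x hm; omega)]
    have hc2 : s.count (x-1) = 0 := by
      rw [hdec (x-1) i hi, if_neg (by omega : ¬ s[i]'hi = x - 1),
        List.count_eq_zero.mpr (fun hm => by have := hT (x-1) hm; omega),
        List.count_eq_zero.mpr (fun hm => by have := hD (x-1) hm; omega)]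
    have hc3 : s.count (x+1) = 0 := by
      rw [hdec (x+1) i hi, if_neg (by omega : ¬ s[i]'hi = x + 1),
        List.count_eq_zero.mpr (fun hm => by have := hT (x+1) hm; omega),
        List.count_eq_zero.mpr (fun hm => by have := hD (x+1) hm; omega)]
    refine ⟨(hmemi x).mp (hgi ▸ List.getElem_mem hi), ?_⟩
    simp [pvLonelyB, ← hcnt, hc1, hc2, hc3]
  · rintro ⟨hxm, hB⟩
    simp only [pvLonelyB, Bool.and_eq_true, beq_iff_eq] at hB
    obtain ⟨⟨hb1, hb2⟩, hb3⟩ := hB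
    rw [← hcnt] at hb1 hb2 hb3
    rcases List.mem_iff_getElem.mp ((hmemi x).mpr hxm) with ⟨i, hi, hgi⟩
    have hd := hdec x i hi
    rw [if_pos hgi, hb1] at hd
    have hnt : x ∉ s.take i := by
      intro hm; have := List.count_pos_iff.mpr hm; omega
    have hnd : x ∉ s.drop (i+1) := by
      intro hm; have := List.count_pos_iff.mpr hm; omega
    have hn1 : (x - 1) ∉ s := List.count_eq_zero.mp hb2
    have hn2 : (x + 1) ∉ s := List.count_eq_zero.mp hb3
    refine ⟨i, hi, by rw [List.getD_eq_getElem s 0 hi]; exact hgi, ?_, ?_⟩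
    · by_cases h0 : i = 0
      · exact Or.inl h0
      · right
        rw [List.getD_eq_getElem _ _ (by omega : i - 1 < s.length),
          List.getD_eq_getElem _ _ hi, hgi]
        have hmem1 : s[i-1]'(by omega) ∈ s.take i :=
          List.mem_take_iff_getElem.mpr ⟨i-1, by omega, rfl⟩
        have hle := mono (i-1) i (by omega) hi
        have hne : s[i-1]'(by omega) ≠ x := fun hc => hnt (hc ▸ hmem1)
        have hne1 : s[i-1]'(by omega) ≠ x - 1 := fun hc => hn1 (hc ▸ List.getElem_mem _)
        omega
    · by_cases h1 : i + 1 = s.length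
      · exact Or.inl h1
      · right
        have hi1 : i + 1 < s.length := by omega
        rw [List.getD_eq_getElem _ _ hi1, List.getD_eq_getElem _ _ hi, hgi]
        have hmem1 : s[i+1]'hi1 ∈ s.drop (i+1) := by
          have h0 : 0 < (s.drop (i+1)).length := by rw [List.length_drop]; omega
          have hmm := List.getElem_mem h0
          rw [List.getElem_drop] at hmm
          simpa using hmm
        have hge := mono i (i+1) (by omega) hi1
        have hne : s[i+1]'hi1 ≠ x := fun hc => hnd (hc ▸ hmem1)
        have hne2 : s[i+1]'hi1 ≠ x + 1 := fun hc => hn2 (hc ▸ List.getElem_mem _)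
        omega

theorem pvAlt_eq_filter (nums : List Int) :
    findLonely_alt nums = nums.filter (pvLonelyB nums) := by
  unfold findLonely_alt
  refine List.filter_congr ?_
  intro x hx
  rw [Bool.eq_iff_iff]
  rw [show (PySem.Set.contains
      ((PySem.List.enumerate (PySem.List.sorted nums (fun x => x))).foldl
        (fun lonely p => if pvCond (PySem.List.sorted nums (fun x => x)) p.1 p.2
          then PySem.Set.add lonely p.2 else lonely) PySem.Set.empty) x = true)
    ↔ x ∈ ((PySem.List.enumerate (PySem.List.sorted nums (fun x => x))).foldl
        (fun lonely p => if pvCond (PySem.List.sorted nums (fun x => x)) p.1 p.2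
          then PySem.Set.add lonely p.2 else lonely) PySem.Set.empty)
    from List.contains_iff_mem]
  rw [pvMem_foldl_add_ite]
  constructor
  · rintro (h | ⟨p, hp, hc, rfl⟩)
    · simp [PySem.Set.empty] at h
    · rcases (pvMem_enumerate _ 0 p).mp hp with ⟨i, hi, rfl⟩
      have hz : ((0:Int) + (i:Int)) = (i:Int) := by ring
      rw [hz] at hc
      have := (pvCond_iff _ i hi).mp hc
      exact ((pvLonely_iff nums _).mp ⟨i, hi, rfl, this⟩).2
  · intro hB
    rcases (pvLonely_iff nums x).mpr ⟨hx, hB⟩ with ⟨i, hi, hgi, hC⟩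
    refine Or.inr ⟨((i:Int), (PySem.List.sorted nums (fun x => x)).getD i 0),
      (pvMem_enumerate _ 0 _).mpr ⟨i, hi, by rw [zero_add]⟩, ?_, hgi⟩
    exact (pvCond_iff _ i hi).mpr hC

-- a flip of the filter predicate at a member makes the filtered lists differ
theorem pvFilter_ne_of_flip {nums : List Int} {p q : Int → Bool}
    {x : Int} (hx : x ∈ nums) (hflip : p x ≠ q x) :
    nums.filter p ≠ nums.filter q := by
  intro heq
  cases hp : p x with
  | true =>
      have h1 : x ∈ nums.filter p := List.mem_filter.mpr ⟨hx, hp⟩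
      rw [heq] at h1
      exact hflip (by rw [hp, (List.mem_filter.mp h1).2])
  | false =>
      have hq : q x = true := by
        cases hq : q x with
        | true => rfl
        | false => exact absurd (hp.trans hq.symm) hflip
      have h1 : x ∈ nums.filter q := List.mem_filter.mpr ⟨hx, hq⟩
      rw [← heq] at h1
      exact hflip ((List.mem_filter.mp h1).2.trans hq.symm)

-- ===== VERDICT (by name: the statement is the Claim_ definition above) =====
theorem findLonely_spec : Claim_unchanged_findLonely := by
  intro nums hdom hpre hnd
  rw [pvA_eq_filter nums hpre, pvAlt_eq_filter nums]
  refine List.filter_congr ?_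
  intro x hx
  cases hB : pvLonelyB nums x with
  | false =>
    cases hA : pvLonelyA nums x with
    | false => rfl
    | true => exact absurd (pvLonelyA_le nums x hx hA) (by simp [hB])
  | true =>
    simp only [pvLonelyB, Bool.and_eq_true, beq_iff_eq] at hB
    obtain ⟨⟨h1, h2⟩, h3⟩ := hB
    have hnp : ∀ n ∈ nums, ¬(|x - n - 1000002| ≤ 1 ∨ |n - x - 1000002| ≤ 1) := by
      intro n hn hc
      exact hnd ⟨x, hx, h1, List.count_eq_zero.mp h2, List.count_eq_zero.mp h3, n, hn, hc⟩
    have hxb : -1000001 ≤ x ∧ x ≤ 1000000 := hpre x hx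
    have e0 := pvCntR_eq_count nums hpre x hxb hnp 0 (by omega)
    have em := pvCntR_eq_count nums hpre x hxb hnp (-1) (by omega)
    have ep := pvCntR_eq_count nums hpre x hxb hnp 1 (by omega)
    rw [show x + (0:Int) = x by ring] at e0
    rw [show x + (-1:Int) = x - 1 by ring] at em
    rw [show x + (1:Int) = x + 1 by ring] at ep
    simp [pvLonelyA, e0, em, ep, h1, h2, h3]

theorem findLonely_changed : Claim_changed_findLonely := by
  unfold Claim_changed_findLonely
  refine ⟨by decide, by decide, by decide, ?_, by decide, by decide⟩
  rw [pvA_eq_filter pvDiffWitness_findLonely (by decide)]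
  decide

theorem findLonely_tight : Claim_exact_findLonely := by
  intro nums hdom hpre hd
  rw [pvA_eq_filter nums hpre, pvAlt_eq_filter nums]
  obtain ⟨x, hx, h1, h2, h3, n0, hn, hc⟩ := hd
  have hA : pvLonelyA nums x = false := pvLonelyA_false_of_partner nums x n0 hx hn hc
  have hB : pvLonelyB nums x = true := by
    simp [pvLonelyB, h1, List.count_eq_zero.mpr h2, List.count_eq_zero.mpr h3]
  exact pvFilter_ne_of_flip hx (by simp [hA, hB])
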